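-- pv_equiv track=rewrite | github.com/filipciesielski7/Lech-Licznik | sectors.py | sectors_capacity
-- ===== SOURCE A (Python) =====
-- def sectors_capacity(seats):
--     capacities = {}
--     for seat in seats:
--         sector_id = seat["sectorId"]
--         if sector_id not in capacities:
--             capacities[sector_id] = 1
--         else:
--             capacities[sector_id] += 1
--     return capacities
-- ===== SOURCE B (Python) =====
-- def sectors_capacity(seats):
--     # Two-pass: collect the ids, then count each distinct id once
--     # (first-occurrence order, like dict insertion order in A).
--     ids = [seat["sectorId"] for seat in seats]
--     return {sid: ids.count(sid) for sid in dict.fromkeys(ids)}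
-- ===== Notes on version B (the rewrite author's own statement) =====
-- stated objective: alternative
-- what changed: Replaces A's one-pass hash accumulation (membership test + increment per seat) with a two-pass dedup-then-count: extract the id list, deduplicate it keeping first occurrences, and count each distinct id over the whole list.
import Mathlib
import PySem

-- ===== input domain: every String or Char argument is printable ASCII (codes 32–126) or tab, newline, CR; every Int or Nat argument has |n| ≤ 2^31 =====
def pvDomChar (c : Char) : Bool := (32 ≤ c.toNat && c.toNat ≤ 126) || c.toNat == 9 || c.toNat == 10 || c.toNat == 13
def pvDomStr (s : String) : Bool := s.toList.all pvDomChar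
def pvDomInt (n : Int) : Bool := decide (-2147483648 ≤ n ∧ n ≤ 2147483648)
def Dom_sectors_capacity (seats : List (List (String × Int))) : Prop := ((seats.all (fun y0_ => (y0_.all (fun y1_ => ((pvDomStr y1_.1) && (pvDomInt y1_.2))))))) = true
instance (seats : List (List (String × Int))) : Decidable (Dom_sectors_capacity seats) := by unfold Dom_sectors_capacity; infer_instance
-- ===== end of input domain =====

-- B replaces A's one-pass hash accumulation with a dedup-then-count two-pass scheme (alternative decomposition, same results).
-- ===== PORT A =====
-- seat["sectorId"]: exact whenever the key is present (guaranteed by Pre_); Python raises KeyError otherwise.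
def pvSeatId (seat : List (String × Int)) : Int :=
  ((PySem.Dict.ofList seat).get? "sectorId").getD 0

def sectors_capacity (seats : List (List (String × Int))) : List (Int × Int) :=
  (seats.foldl (fun caps seat =>
      let sector_id := pvSeatId seat
      if !(caps.contains sector_id) then caps.insert sector_id 1
      else caps.insert sector_id (caps.getD sector_id 0 + 1))
    PySem.Dict.empty).items

-- ===== PORT B =====
def sectors_capacity_alt (seats : List (List (String × Int))) : List (Int × Int) :=
  let ids := seats.map pvSeatId
  (PySem.List.dedup ids).map (fun sid => (sid, (PySem.List.count ids sid : Int)))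

-- ===== PRECONDITION & SPEC =====
-- Pre_ excludes seats missing the "sectorId" key, on which A raises KeyError.
def Pre_sectors_capacity (seats : List (List (String × Int))) : Prop :=
  (seats.all (fun s => (PySem.Dict.ofList s).contains "sectorId")) = true
instance (seats : List (List (String × Int))) : Decidable (Pre_sectors_capacity seats) := by unfold Pre_sectors_capacity; infer_instance
def pvWitness_sectors_capacity : (List (List (String × Int))) :=
  [[("sectorId", 2)], [("sectorId", 1)], [("sectorId", 2)]]

def Spec_sectors_capacity (seats : List (List (String × Int))) (out : List (Int × Int)) : Prop := out = sectors_capacity_alt seats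
instance (seats : List (List (String × Int))) (out : List (Int × Int)) : Decidable (Spec_sectors_capacity seats out) := by unfold Spec_sectors_capacity; infer_instance

-- ===== CLAIM (what is proved, stated in full; the proofs are below) =====
def Claim_equal_sectors_capacity : Prop := ∀ (seats : List (List (String × Int))), Dom_sectors_capacity seats → Pre_sectors_capacity seats → Spec_sectors_capacity seats (sectors_capacity seats)

-- ===== LEMMAS AND PROOFS =====
-- A's loop body is, extensionally, the standard counting insert.
theorem pvStep_eq (caps : PySem.Dict Int Int) (seat : List (String × Int)) :
    (let sector_id := pvSeatId seat
     if !(caps.contains sector_id) then caps.insert sector_id 1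
     else caps.insert sector_id (caps.getD sector_id 0 + 1))
    = caps.insert (pvSeatId seat) (caps.getD (pvSeatId seat) 0 + 1) := by
  by_cases h : caps.contains (pvSeatId seat)
  · simp [h]
  · simp only [Bool.not_eq_true] at h
    simp [h, PySem.Dict.getD_of_not_contains]

-- ===== VERDICT (by name: the statement is the Claim_ definition above) =====
theorem sectors_capacity_spec : Claim_equal_sectors_capacity := by
  intro seats _ _
  show sectors_capacity seats = sectors_capacity_alt seats
  unfold sectors_capacity sectors_capacity_alt
  rw [show (fun (caps : PySem.Dict Int Int) (seat : List (String × Int)) =>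
        let sector_id := pvSeatId seat
        if !(caps.contains sector_id) then caps.insert sector_id 1
        else caps.insert sector_id (caps.getD sector_id 0 + 1))
      = fun caps seat => caps.insert (pvSeatId seat) (caps.getD (pvSeatId seat) 0 + 1)
      from funext fun c => funext fun s => pvStep_eq c s]
  have hfold : ∀ (l : List (List (String × Int))) (d : PySem.Dict Int Int),
      l.foldl (fun caps seat => caps.insert (pvSeatId seat) (caps.getD (pvSeatId seat) 0 + 1)) d
      = (l.map pvSeatId).foldl (fun caps sid => caps.insert sid (caps.getD sid 0 + 1)) d := by
    intro l
    induction l with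
    | nil => intro d; rfl
    | cons x xs ih => intro d; simp [ih]
  rw [hfold, PySem.Dict.foldl_insert_getD_add_one_eq_counter, PySem.Dict.items_counter]
  simp [PySem.List.dedup_eq_ofList, PySem.List.count_eq]
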